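-- pv_equiv track=rewrite | github.com/Enochsem/Cryptography-Algorithms | physicalShift1.py | shift3decrypt
-- ===== SOURCE A (Python) =====
-- import string
--
-- alphabets = string.ascii_lowercase
--
-- def shift3decrypt(ciphertexts,key): # m=ciphertext
--     keyIndex = alphabets.index(key)
--     final =[]
--     ciphertexts = list(ciphertexts)
--     for letter in range(len(ciphertexts)):
--         if ciphertexts[letter] != " ":
--             letterIndex = alphabets[::-1].index(ciphertexts[letter]) #pick from the reversed letters
--             cipherIndex = letterIndex + keyIndex
--             lettersLeft = (len(alphabets)-1) -  cipherIndex
--             if cipherIndex <= len(alphabets)-1: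
--                 message = alphabets[::-1][cipherIndex]
--                 final.append(message.lower())
--             else:
--                 message = alphabets[::-1][abs(lettersLeft)-1] # pick from index value
--                 final.append(message.lower())
--         else:
--             final.append(" ")
--     return "".join(final)
-- ===== SOURCE B (Python) =====
-- import string
--
-- alphabets = string.ascii_lowercase
--
-- def shift3decrypt(ciphertexts, key):
--     k = alphabets.index(key)
--     table = str.maketrans(alphabets[k:] + alphabets[:k], alphabets)
--     return ciphertexts.translate(table)
-- ===== Notes on version B (the rewrite author's own statement) =====
-- stated objective: idiomatic
-- what changed: B precomputes one rotated-alphabet translation table with str.maketrans and decrypts by a single ciphertexts.translate pass, instead of A's per-character reversed-alphabet index search with two explicit wraparound branches.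
import Mathlib
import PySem

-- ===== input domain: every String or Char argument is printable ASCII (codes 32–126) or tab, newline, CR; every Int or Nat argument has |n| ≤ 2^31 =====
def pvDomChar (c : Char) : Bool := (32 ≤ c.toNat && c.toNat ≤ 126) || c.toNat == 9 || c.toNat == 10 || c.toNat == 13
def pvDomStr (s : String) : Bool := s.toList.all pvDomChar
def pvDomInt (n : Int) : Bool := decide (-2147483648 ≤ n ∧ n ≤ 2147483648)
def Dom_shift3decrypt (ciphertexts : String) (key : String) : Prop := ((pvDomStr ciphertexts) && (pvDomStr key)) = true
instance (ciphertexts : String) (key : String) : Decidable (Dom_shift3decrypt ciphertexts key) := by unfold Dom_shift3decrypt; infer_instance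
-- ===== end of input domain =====

-- B builds one rotated-alphabet translation table (str.maketrans) and translates the whole
-- string through it, instead of A's per-character reversed-alphabet search with wrap branches.

-- module-level constant 'alphabets = string.ascii_lowercase', shared by both Pythons
def pvAlph : List Char := "abcdefghijklmnopqrstuvwxyz".toList

-- ===== PORT A =====
def shift3decrypt (ciphertexts : String) (key : String) : String :=
  -- keyIndex = alphabets.index(key); .index raises ValueError when key is absent — Pre_ requires it to occur
  let keyIndex : Int := PySem.Chars.find pvAlph key.toList
  -- for letter in range(len(ciphertexts)): … appending to final, then "".join(final)
  let final : List Char :=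
    ciphertexts.toList.foldl (fun acc c =>
      if c ≠ ' ' then
        -- letterIndex = alphabets[::-1].index(c); .index raises when c is not a lowercase letter — excluded by Pre_
        let rev : List Char := (PySem.List.slice? pvAlph none none (-1)).getD []
        let letterIndex : Int := PySem.Chars.find rev c.toString.toList
        let cipherIndex : Int := letterIndex + keyIndex
        let lettersLeft : Int := (26 - 1) - cipherIndex
        if cipherIndex ≤ 26 - 1 then
          -- message = alphabets[::-1][cipherIndex] (in range under Pre_); final.append(message.lower())
          acc ++ PySem.Chars.lower [PySem.List.pyGetD rev cipherIndex ' ']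
        else
          acc ++ PySem.Chars.lower [PySem.List.pyGetD rev (|lettersLeft| - 1) ' ']
      else
        acc ++ [' ']) []
  String.ofList final

-- ===== PORT B =====
def shift3decrypt_alt (ciphertexts : String) (key : String) : String :=
  let k : Int := PySem.Chars.find pvAlph key.toList
  -- table = str.maketrans(alphabets[k:] + alphabets[:k], alphabets): first-string char ↦ second-string char
  let table : List (Char × Char) :=
    (PySem.List.slice pvAlph (some k) none ++ PySem.List.slice pvAlph none (some k)).zip pvAlph
  -- ciphertexts.translate(table): each char mapped through the table, left unchanged when absent
  String.ofList (ciphertexts.toList.map (fun c => ((table.lookup c).getD c)))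

-- ===== PRECONDITION & SPEC =====
-- A raises ValueError when the key is not a substring of the alphabet or when a ciphertext
-- character is neither a space nor a lowercase letter; Pre_ excludes exactly those inputs.
def Pre_shift3decrypt (ciphertexts : String) (key : String) : Prop :=
  PySem.Chars.isIn key.toList pvAlph = true ∧
  ciphertexts.toList.all (fun c => c == ' ' || pvAlph.contains c) = true
instance (ciphertexts : String) (key : String) : Decidable (Pre_shift3decrypt ciphertexts key) := by
  unfold Pre_shift3decrypt; infer_instance

def pvWitness_shift3decrypt : String × String := ("k d", "d")

def Spec_shift3decrypt (ciphertexts : String) (key : String) (out : String) : Prop := out = shift3decrypt_alt ciphertexts key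
instance (ciphertexts : String) (key : String) (out : String) : Decidable (Spec_shift3decrypt ciphertexts key out) := by unfold Spec_shift3decrypt; infer_instance

-- ===== CLAIM (what is proved, stated in full; the proofs are below) =====
def Claim_equal_shift3decrypt : Prop := ∀ (ciphertexts : String) (key : String), Dom_shift3decrypt ciphertexts key → Pre_shift3decrypt ciphertexts key → Spec_shift3decrypt ciphertexts key (shift3decrypt ciphertexts key)

-- ===== LEMMAS AND PROOFS =====

-- A's per-character result, extracted from its fold body (proof-only helper)
def pvStepA (k : Int) (c : Char) : Char :=
  if c ≠ ' ' then
    let rev : List Char := pvAlph.reverse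
    let li : Int := PySem.Chars.find rev [c]
    let ci : Int := li + k
    if ci ≤ 26 - 1 then PySem.Chars.lowerChar (PySem.List.pyGetD rev ci ' ')
    else PySem.Chars.lowerChar (PySem.List.pyGetD rev (|26 - 1 - ci| - 1) ' ')
  else ' '

-- B's per-character result for key index K (proof-only helper)
def pvStepB (K : Nat) (c : Char) : Char :=
  ((((pvAlph.drop K ++ pvAlph.take K).zip pvAlph).lookup c).getD c)

set_option maxRecDepth 100000 in
lemma pvStep_all :
    ((List.range 26).all (fun K =>
      (' ' :: pvAlph).all (fun c => pvStepA (K : Int) c == pvStepB K c))) = true := by decide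

lemma pvStep_eq (k : Int) (hk0 : 0 ≤ k) (hk : k < 26) (c : Char) (hc : c = ' ' ∨ c ∈ pvAlph) :
    pvStepA k c = pvStepB k.toNat c := by
  have hmem : k.toNat ∈ List.range 26 := List.mem_range.mpr (by omega)
  have h1 := List.all_eq_true.mp pvStep_all _ hmem
  have hcm : c ∈ (' ' :: pvAlph) := by
    rcases hc with h | h
    · subst h; exact List.mem_cons_self
    · exact List.mem_cons_of_mem _ h
  have h2 := List.all_eq_true.mp h1 c hcm
  have hk' : ((k.toNat : Nat) : Int) = k := by omega
  rw [hk'] at h2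
  exact eq_of_beq h2

-- A's fold appends one character per input character: it is a map of pvStepA
lemma pvFoldA_eq_map (k : Int) (l : List Char) (acc : List Char) :
    l.foldl (fun acc c =>
      if c ≠ ' ' then
        let rev : List Char := (PySem.List.slice? pvAlph none none (-1)).getD []
        let letterIndex : Int := PySem.Chars.find rev c.toString.toList
        let cipherIndex : Int := letterIndex + k
        let lettersLeft : Int := (26 - 1) - cipherIndex
        if cipherIndex ≤ 26 - 1 then
          acc ++ PySem.Chars.lower [PySem.List.pyGetD rev cipherIndex ' ']
        else
          acc ++ PySem.Chars.lower [PySem.List.pyGetD rev (|lettersLeft| - 1) ' ']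
      else
        acc ++ [' ']) acc = acc ++ l.map (pvStepA k) := by
  induction l generalizing acc with
  | nil => simp
  | cons c t ih =>
      have hrev : (PySem.List.slice? pvAlph none none (-1)).getD [] = pvAlph.reverse := by
        rw [PySem.List.slice?_none_none_neg_one]; rfl
      have hc1 : c.toString.toList = [c] := by simp [Char.toString]
      rw [List.foldl_cons, ih]
      simp only [hrev, hc1]
      split_ifs with h1 h2
      · simp [pvStepA, h1, PySem.Chars.lower]
        intro h; exfalso; omega
      · simp [pvStepA, h1, PySem.Chars.lower]
        intro h; exfalso; omega
      · simp [pvStepA, h1]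

-- 0 ≤ alphabets.index(key) < 26 when the key occurs in the alphabet
lemma pvKeyIndex_bounds (key : List Char) (h : PySem.Chars.isIn key pvAlph = true) :
    0 ≤ PySem.Chars.find pvAlph key ∧ PySem.Chars.find pvAlph key < 26 := by
  have hinf : key <:+: pvAlph := (PySem.Chars.isIn_iff_infix key pvAlph).mp h
  have h0 : 0 ≤ PySem.Chars.find pvAlph key := (PySem.Chars.find_nonneg_iff pvAlph key).mpr hinf
  refine ⟨h0, ?_⟩
  rcases key with _ | ⟨c, t⟩
  · rw [PySem.Chars.find_nil]; norm_num
  · have hspec := PySem.Chars.find_spec h0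
    have hlen : (c :: t).length ≤ (pvAlph.drop (PySem.Chars.find pvAlph (c :: t)).toNat).length :=
      hspec.1.length_le
    have hle := PySem.Chars.find_le_length pvAlph (c :: t)
    have h26 : pvAlph.length = 26 := by decide
    simp only [List.length_drop, h26, List.length_cons] at hlen
    simp only [h26] at hle
    omega

-- ===== VERDICT (by name: the statement is the Claim_ definition above) =====
theorem shift3decrypt_spec : Claim_equal_shift3decrypt := by
  intro ciphertexts key _ hpre
  obtain ⟨hkey, hcharsb⟩ := hpre
  have hchars : ∀ c ∈ ciphertexts.toList, c = ' ' ∨ c ∈ pvAlph := by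
    intro c hc
    have := List.all_eq_true.mp hcharsb c hc
    simpa using this
  obtain ⟨hk0, hk26⟩ := pvKeyIndex_bounds key.toList hkey
  show shift3decrypt ciphertexts key = shift3decrypt_alt ciphertexts key
  simp only [shift3decrypt, shift3decrypt_alt]
  rw [pvFoldA_eq_map,
      PySem.List.slice_from _ hk0, PySem.List.slice_to _ hk0]
  simp only [List.nil_append]
  congr 1
  apply List.map_congr_left
  intro c hc
  exact pvStep_eq _ hk0 hk26 c (hchars c hc)
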